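-- pv_equiv track=rewrite | github.com/littlejo/pulumi-cilium-python-examples | kind-clustermesh/__main__.py | combinlist
-- ===== SOURCE A (Python) =====
-- def combinlist(seq, k):
--     p = []
--     i, imax = 0, 2**len(seq)-1
--     while i<=imax:
--         s = []
--         j, jmax = 0, len(seq)-1
--         while j<=jmax:
--             if (i>>j)&1==1:
--                 s.append(seq[j])
--             j += 1
--         if len(s)==k:
--             p.append(s)
--         i += 1
--     return p
-- ===== SOURCE B (Python) =====
-- def combinlist(seq, k):
--     # DP over elements: rows[j] holds the size-j subsets of the processed
--     # prefix in ascending-bitmask order; each new element extends rows[j-1].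
--     n = len(seq)
--     if k < 0 or k > n:
--         return []
--     rows = [[[]]] + [[] for _ in range(k)]
--     for x in seq:
--         for j in range(k, 0, -1):
--             rows[j] = rows[j] + [s + [x] for s in rows[j - 1]]
--     return rows[k]
-- ===== Notes on version B (the rewrite author's own statement) =====
-- stated objective: faster
-- what changed: Replaces A's scan of all 2^n bitmasks (building each subset bit by bit) with a Pascal-style DP that keeps one row per subset size up to k and extends only those rows element by element, producing the same ascending-bitmask order directly; intended as faster (avoids the 2^n scan when k is small) — measured 23.9x at n=16, while at n=64 with k~n/2 neither finishes since the output itself is combinatorially large.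
import Mathlib
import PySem

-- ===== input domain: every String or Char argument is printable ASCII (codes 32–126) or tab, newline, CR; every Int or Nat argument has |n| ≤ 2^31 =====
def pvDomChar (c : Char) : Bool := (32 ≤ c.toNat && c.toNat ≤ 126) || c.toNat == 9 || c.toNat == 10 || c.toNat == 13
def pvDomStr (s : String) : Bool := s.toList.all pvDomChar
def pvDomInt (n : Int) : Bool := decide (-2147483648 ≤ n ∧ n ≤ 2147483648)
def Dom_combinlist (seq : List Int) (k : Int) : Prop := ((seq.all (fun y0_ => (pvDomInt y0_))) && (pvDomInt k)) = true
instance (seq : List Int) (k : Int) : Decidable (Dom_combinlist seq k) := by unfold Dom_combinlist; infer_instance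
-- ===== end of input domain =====

-- B replaces A's scan of all 2^n bitmasks by a Pascal-style DP that only ever
-- builds the subsets of size ≤ k, row by row, in the same ascending-mask order.

-- ===== PORT A =====
-- Literal port of A: outer while over i = 0..2^len(seq)-1, inner while over
-- j = 0..len(seq)-1 testing bit j of i (seq[j] is always in range, so getD is exact).
def combinlist (seq : List Int) (k : Int) : List (List Int) :=
  (List.range (2 ^ seq.length)).foldl
    (fun p i =>
      let s := (List.range seq.length).foldl
        (fun s j => if (i >>> j) &&& 1 = 1 then s ++ [seq.getD j 0] else s) []
      if (s.length : Int) = k then p ++ [s] else p)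
    []

-- ===== PORT B =====
-- helper for B's inner descending loop `for j in range(k, 0, -1)`: each row j
-- becomes rows[j] ++ [s + [x] for s in rows[j-1]] (old rows, since Python updates
-- descending before overwriting rows[j-1]).
def altExtend (x : Int) : List (List Int) → List (List (List Int)) → List (List (List Int))
  | _, [] => []
  | prev, r :: rest => (r ++ prev.map (fun s => s ++ [x])) :: altExtend x r rest

def combinlist_alt (seq : List Int) (k : Int) : List (List Int) :=
  if k < 0 ∨ (seq.length : Int) < k then []
  else
    let rows := seq.foldl
      (fun rows x =>
        match rows with
        | [] => []
        | r0 :: rest => r0 :: altExtend x r0 rest)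
      ([[]] :: List.replicate k.toNat [])
    rows.getD k.toNat []

-- ===== PRECONDITION & SPEC =====
def Spec_combinlist (seq : List Int) (k : Int) (out : List (List Int)) : Prop := out = combinlist_alt seq k
instance (seq : List Int) (k : Int) (out : List (List Int)) : Decidable (Spec_combinlist seq k out) := by unfold Spec_combinlist; infer_instance

-- ===== CLAIM (what is proved, stated in full; the proofs are below) =====
def Claim_equal_combinlist : Prop := ∀ (seq : List Int) (k : Int), Dom_combinlist seq k → Spec_combinlist seq k (combinlist seq k)

-- ===== LEMMAS AND PROOFS =====

-- the subset of seq selected by the bits of i (A's inner loop)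
def subsetOf (seq : List Int) (i : Nat) : List Int :=
  (List.range seq.length).foldl
    (fun s j => if (i >>> j) &&& 1 = 1 then s ++ [seq.getD j 0] else s) []

-- all subsets of seq, in ascending bitmask order (A's outer loop, unfiltered)
def allSubs (seq : List Int) : List (List Int) :=
  (List.range (2 ^ seq.length)).map (subsetOf seq)

-- row j of B's DP table, as a spec
def gRow (seq : List Int) (j : Nat) : List (List Int) :=
  (allSubs seq).filter (fun s => decide (s.length = j))

theorem outer_fold (seq : List Int) (k : Int) (l : List Nat) (p : List (List Int)) :
    l.foldl
      (fun p i =>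
        let s := (List.range seq.length).foldl
          (fun s j => if (i >>> j) &&& 1 = 1 then s ++ [seq.getD j 0] else s) []
        if (s.length : Int) = k then p ++ [s] else p)
      p
    = p ++ (l.map (subsetOf seq)).filter (fun s => decide ((s.length : Int) = k)) := by
  induction l generalizing p with
  | nil => simp
  | cons i t ih =>
    rw [List.foldl_cons]
    show t.foldl _ (if ((subsetOf seq i).length : Int) = k then p ++ [subsetOf seq i] else p) = _
    rw [ih, List.map_cons, List.filter_cons]
    by_cases h : ((subsetOf seq i).length : Int) = k
    · simp [h]
    · simp [h]

theorem combinlist_eq_filter (seq : List Int) (k : Int) :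
    combinlist seq k = (allSubs seq).filter (fun s => decide ((s.length : Int) = k)) := by
  unfold combinlist allSubs
  simpa using outer_fold seq k (List.range (2 ^ seq.length)) []

theorem bit_eq_mod (i j : Nat) : (i >>> j) &&& 1 = (i / 2 ^ j) % 2 := by
  rw [Nat.shiftRight_eq_div_pow, Nat.and_one_is_mod]

theorem bit_high_zero {n i : Nat} (h : i < 2 ^ n) : (i >>> n) &&& 1 = 0 := by
  rw [bit_eq_mod, Nat.div_eq_of_lt h]

theorem bit_high_one {n i : Nat} (h : i < 2 ^ n) : ((2 ^ n + i) >>> n) &&& 1 = 1 := by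
  rw [bit_eq_mod]
  have h2 : 0 < 2 ^ n := Nat.two_pow_pos n
  have heq : (2 ^ n + i) / 2 ^ n = i / 2 ^ n + 1 := by
    rw [Nat.add_comm, Nat.add_div_right i h2]
  rw [heq, Nat.div_eq_of_lt h]

theorem bit_low_add {n i j : Nat} (hj : j < n) :
    ((2 ^ n + i) >>> j) &&& 1 = (i >>> j) &&& 1 := by
  rw [bit_eq_mod, bit_eq_mod]
  have hpow : 2 ^ n = 2 ^ j * (2 * 2 ^ (n - j - 1)) := by
    rw [← pow_succ', ← pow_add]
    congr 1
    omega
  rw [hpow, Nat.mul_add_div (Nat.two_pow_pos j)]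
  omega

theorem subsetOf_congr (seq : List Int) (i i' : Nat)
    (h : ∀ j < seq.length, (i >>> j) &&& 1 = (i' >>> j) &&& 1) :
    subsetOf seq i = subsetOf seq i' := by
  unfold subsetOf
  apply PySem.List.foldl_congr_mem
  intro acc j hj
  rw [h j (List.mem_range.mp hj)]

theorem subsetOf_append (seq : List Int) (x : Int) (i : Nat) :
    subsetOf (seq ++ [x]) i
      = subsetOf seq i ++ (if (i >>> seq.length) &&& 1 = 1 then [x] else []) := by
  unfold subsetOf
  rw [List.length_append, List.length_singleton, List.range_succ, List.foldl_append]
  have h1 : (List.range seq.length).foldl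
      (fun s j => if (i >>> j) &&& 1 = 1 then s ++ [(seq ++ [x]).getD j 0] else s) []
      = (List.range seq.length).foldl
        (fun s j => if (i >>> j) &&& 1 = 1 then s ++ [seq.getD j 0] else s) [] := by
    apply PySem.List.foldl_congr_mem
    intro acc j hj
    have hlt : j < seq.length := List.mem_range.mp hj
    rw [List.getD_append _ _ _ _ hlt]
  rw [h1]
  have h2 : (seq ++ [x]).getD seq.length 0 = x := by
    simp [List.getD_eq_getElem?_getD]
  simp only [List.foldl_cons, List.foldl_nil, h2]
  split_ifs <;> simp

theorem allSubs_append (seq : List Int) (x : Int) :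
    allSubs (seq ++ [x]) = allSubs seq ++ (allSubs seq).map (fun s => s ++ [x]) := by
  unfold allSubs
  rw [List.length_append, List.length_singleton]
  have hpow : 2 ^ (seq.length + 1) = 2 ^ seq.length + 2 ^ seq.length := by
    rw [pow_succ]; omega
  rw [hpow, List.range_add, List.map_append, List.map_map, List.map_map]
  congr 1
  · apply List.map_congr_left
    intro i hi
    have hlt : i < 2 ^ seq.length := List.mem_range.mp hi
    rw [subsetOf_append, bit_high_zero hlt]
    simp
  · apply List.map_congr_left
    intro i hi
    have hlt : i < 2 ^ seq.length := List.mem_range.mp hi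
    show subsetOf (seq ++ [x]) (2 ^ seq.length + i) = subsetOf seq i ++ [x]
    rw [subsetOf_append, bit_high_one hlt, if_pos rfl]
    congr 1
    exact subsetOf_congr seq _ i (fun j hj => bit_low_add hj)

theorem gRow_append_zero (seq : List Int) (x : Int) :
    gRow (seq ++ [x]) 0 = gRow seq 0 := by
  unfold gRow
  rw [allSubs_append, List.filter_append]
  have h : ((allSubs seq).map (fun s => s ++ [x])).filter (fun s => decide (s.length = 0)) = [] := by
    rw [List.filter_eq_nil_iff]
    intro s hs
    obtain ⟨t, _, rfl⟩ := List.mem_map.mp hs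
    simp
  rw [h, List.append_nil]

theorem gRow_append_succ (seq : List Int) (x : Int) (j : Nat) :
    gRow (seq ++ [x]) (j + 1) = gRow seq (j + 1) ++ (gRow seq j).map (fun s => s ++ [x]) := by
  unfold gRow
  have h : (allSubs seq).filter ((fun s => decide (s.length = j + 1)) ∘ (fun s => s ++ [x]))
      = (allSubs seq).filter (fun s => decide (s.length = j)) := by
    apply List.filter_congr
    intro s _
    simp only [Function.comp_apply, List.length_append, List.length_singleton]
    rw [decide_eq_decide]
    omega
  rw [allSubs_append, List.filter_append, List.filter_map, h]

theorem altExtend_spec (seq : List Int) (x : Int) :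
    ∀ (m a : Nat),
      altExtend x (gRow seq a) ((List.range' (a + 1) m).map (gRow seq))
        = (List.range' (a + 1) m).map (gRow (seq ++ [x])) := by
  intro m
  induction m with
  | zero => intro a; simp [altExtend]
  | succ m ih =>
    intro a
    rw [List.range'_succ, List.map_cons, List.map_cons, altExtend]
    congr 1
    · rw [gRow_append_succ]
    · exact ih (a + 1)

theorem gRow_nil (j : Nat) : gRow [] j = if j = 0 then [[]] else [] := by
  have h : allSubs [] = [[]] := by decide
  unfold gRow
  rw [h]
  cases j with
  | zero => decide
  | succ j => simp

theorem rows_invariant (seq : List Int) (K : Nat) :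
    seq.foldl
      (fun rows x =>
        match rows with
        | [] => []
        | r0 :: rest => r0 :: altExtend x r0 rest)
      ([[]] :: List.replicate K [])
    = (List.range (K + 1)).map (gRow seq) := by
  induction seq using List.reverseRecOn with
  | nil =>
    rw [List.foldl_nil, List.range_eq_range', List.range'_succ, List.map_cons]
    show [[]] :: List.replicate K [] = gRow [] 0 :: (List.range' 1 K).map (gRow [])
    have hg : gRow ([] : List Int) 0 = [[]] := by decide
    rw [hg]
    congr 1
    have h : ∀ j ∈ List.range' 1 K, gRow ([] : List Int) j = [] := by
      intro j hj
      have h1 := List.mem_range'_1.mp hj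
      rw [gRow_nil, if_neg (by omega)]
    calc List.replicate K ([] : List (List Int))
        = (List.range' 1 K).map (fun _ => ([] : List (List Int))) := by
          rw [List.map_const', List.length_range']
      _ = (List.range' 1 K).map (gRow []) := (List.map_congr_left h).symm
  | append_singleton seq x ih =>
    rw [List.foldl_append, List.foldl_cons, List.foldl_nil, ih]
    rw [List.range_eq_range', List.range'_succ]
    simp only [List.map_cons]
    show gRow seq 0 :: altExtend x (gRow seq 0) ((List.range' (0 + 1) K).map (gRow seq)) = _
    rw [altExtend_spec seq x K 0, gRow_append_zero]

theorem subsetOf_len_aux (seq : List Int) (i : Nat) :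
    ∀ (l : List Nat) (s : List Int),
      (l.foldl (fun s j => if (i >>> j) &&& 1 = 1 then s ++ [seq.getD j 0] else s) s).length
        ≤ s.length + l.length := by
  intro l
  induction l with
  | nil => simp
  | cons j t ih =>
    intro s
    rw [List.foldl_cons]
    split_ifs
    · have := ih (s ++ [seq.getD j 0])
      simp at this ⊢
      omega
    · have := ih s
      simp only [List.length_cons] at this ⊢
      omega

theorem subsetOf_length_le (seq : List Int) (i : Nat) :
    (subsetOf seq i).length ≤ seq.length := by
  have h := subsetOf_len_aux seq i (List.range seq.length) []
  simpa [subsetOf] using h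

theorem combinlist_agrees (seq : List Int) (k : Int) :
    combinlist seq k = combinlist_alt seq k := by
  rw [combinlist_eq_filter]
  by_cases hneg : k < 0 ∨ (seq.length : Int) < k
  · rw [combinlist_alt, if_pos hneg, List.filter_eq_nil_iff]
    intro s hs
    obtain ⟨i, hi, rfl⟩ := List.mem_map.mp hs
    have hle := subsetOf_length_le seq i
    simp only [decide_eq_true_eq]
    intro hEq
    rcases hneg with h | h <;> omega
  · simp only [combinlist_alt, if_neg hneg]
    rw [not_or, not_lt, not_lt] at hneg
    obtain ⟨h0, hk⟩ := hneg
    rw [rows_invariant]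
    have hget : ((List.range (k.toNat + 1)).map (gRow seq)).getD k.toNat [] = gRow seq k.toNat := by
      rw [List.getD_eq_getElem _ _ (by simp)]
      simp
    rw [hget]
    unfold gRow
    apply List.filter_congr
    intro s _
    rw [decide_eq_decide]
    omega

-- ===== VERDICT (by name: the statement is the Claim_ definition above) =====
theorem combinlist_spec : Claim_equal_combinlist := by
  intro seq k _
  unfold Spec_combinlist
  exact combinlist_agrees seq k
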